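-- pv_equiv track=rewrite | github.com/peanutChowder/SchoolWork | assignment1/ooclassifier/ooclassifier.py | return_fold_indices
-- ===== SOURCE A (Python) =====
-- def return_fold_indices(ti_len, num):
--     """ Allocates a number of indices within the list of TrainingInstance objects to each fold. Indices are picked using a round robin
--     strategy. If ti_len does not fold evenly into num, then some sublists in fold_indices will contain one more or less indices.
--
--     Arguments:
--         ti_len (int): len of the list of TrainingInstance objects
--         num (int): Number of folds
--
--     Returns:
--         fold_indices (list): list containing num sublists which respectively contain the indicies of the TrainingInstance objects to select
--     """
--     fold_indices = [[] for i in range(num)]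
--     increment = ti_len // num
--
--     if ti_len % num != 0:
--         increment += 1
--
--     i = 0
--     for j in range(ti_len):
--         fold_indices[i].append(j)
--
--         i = (i + 1) % num
--
--     return fold_indices
-- ===== SOURCE B (Python) =====
-- def return_fold_indices(ti_len, num):
--     """Fold i receives exactly the indices i, i+num, i+2*num, ... below ti_len,
--     so build each fold directly with a stride instead of round-robin scattering."""
--     return [list(range(i, ti_len, num)) for i in range(num)]
-- ===== Notes on version B (the rewrite author's own statement) =====
-- stated objective: simpler
-- what changed: B builds each fold directly as the arithmetic stride range(i, ti_len, num) in a one-line comprehension over folds, instead of A's round-robin loop over all indices with a mutable fold counter.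
import Mathlib
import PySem

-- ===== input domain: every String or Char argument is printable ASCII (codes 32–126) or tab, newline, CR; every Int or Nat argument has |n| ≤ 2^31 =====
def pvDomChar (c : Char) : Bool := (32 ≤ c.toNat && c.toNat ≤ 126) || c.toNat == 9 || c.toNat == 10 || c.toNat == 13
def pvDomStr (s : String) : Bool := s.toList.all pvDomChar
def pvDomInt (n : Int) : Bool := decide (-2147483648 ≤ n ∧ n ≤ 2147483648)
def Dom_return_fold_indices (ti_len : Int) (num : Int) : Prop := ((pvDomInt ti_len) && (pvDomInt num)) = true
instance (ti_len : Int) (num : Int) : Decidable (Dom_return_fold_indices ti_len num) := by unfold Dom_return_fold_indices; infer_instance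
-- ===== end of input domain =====

-- B replaces A's round-robin scatter loop by building each fold directly as the stride
-- range(i, ti_len, num), a simpler one-line decomposition; return values agree on all
-- inputs where A returns (Pre_), and Pre_ covers every input on which A returns.


-- ===== PORT A =====
-- Loop body: fold_indices[i].append(j); i = (i + 1) % num.  Under Pre_ the running index
-- st.2 is always ≥ 0, so plain Nat indexing via toNat is exact here.
def rfiStep (num : Int) (st : List (List Int) × Int) (j : Int) : List (List Int) × Int :=
  (st.1.modify st.2.toNat (fun f => f ++ [j]), PySem.Int.mod (st.2 + 1) num)

def return_fold_indices (ti_len : Int) (num : Int) : List (List Int) :=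
  let fold_indices : List (List Int) := (PySem.List.pyRange 0 num 1).map (fun _ => ([] : List Int))
  -- 'increment' is computed and never used, as in A; Python raises ZeroDivisionError here
  -- when num = 0, which Pre_ excludes.
  let increment := PySem.Int.floordiv ti_len num
  let increment := if PySem.Int.mod ti_len num ≠ 0 then increment + 1 else increment
  let st := (PySem.List.pyRange 0 ti_len 1).foldl (rfiStep num) (fold_indices, 0)
  let _ := increment
  st.1

-- ===== PORT B =====
def return_fold_indices_alt (ti_len : Int) (num : Int) : List (List Int) :=
  (PySem.List.pyRange 0 num 1).map (fun i => PySem.List.pyRange i ti_len num)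

-- ===== PRECONDITION & SPEC =====
-- Exactly the inputs on which the Python A returns: num ≥ 1 (normal use), or num < 0 with
-- ti_len ≤ 0 (both loops empty, A returns []).  On everything else A raises (num == 0:
-- ZeroDivisionError from ti_len // num; num < 0 with ti_len > 0: IndexError on the empty
-- fold list), so Pre_ excludes no input on which A returns.
def Pre_return_fold_indices (ti_len : Int) (num : Int) : Prop :=
  1 ≤ num ∨ (num ≤ -1 ∧ ti_len ≤ 0)
instance (ti_len : Int) (num : Int) : Decidable (Pre_return_fold_indices ti_len num) := by
  unfold Pre_return_fold_indices; infer_instance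

def pvWitness_return_fold_indices : Int × Int := (7, 3)

def Spec_return_fold_indices (ti_len : Int) (num : Int) (out : List (List Int)) : Prop :=
  out = return_fold_indices_alt ti_len num
instance (ti_len : Int) (num : Int) (out : List (List Int)) : Decidable (Spec_return_fold_indices ti_len num out) := by
  unfold Spec_return_fold_indices; infer_instance

-- ===== CLAIM (what is proved, stated in full; the proofs are below) =====
def Claim_equal_return_fold_indices : Prop := ∀ (ti_len : Int) (num : Int), Dom_return_fold_indices ti_len num → Pre_return_fold_indices ti_len num → Spec_return_fold_indices ti_len num (return_fold_indices ti_len num)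


-- ===== LEMMAS AND PROOFS =====

-- integer division picked out by a quotient/remainder decomposition
lemma ediv_of_decomp (a b q r : Int) (hb : 0 < b) (h : a = b * q + r) (h0 : 0 ≤ r) (h1 : r < b) :
    a / b = q := by
  have := (Int.ediv_emod_unique (a := a) (b := b) (q := q) (r := r) hb).mpr ⟨by omega, h0, h1⟩
  exact this.1

-- an empty stride range
lemma pyRange_pos_nil (a b s : Int) (hs : 0 < s) (h : b ≤ a) :
    PySem.List.pyRange a b s = [] := by
  rw [PySem.List.pyRange_of_pos _ _ hs, if_neg (by omega)]
  simp

-- extending the upper bound of a stride range by one appends the bound iff it is hit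
lemma stride_succ (i m num : Int) (hnum : 0 < num) (hi0 : 0 ≤ i) (hi : i < num) (hm : 0 ≤ m) :
    PySem.List.pyRange i (m + 1) num =
      (if m % num = i then PySem.List.pyRange i m num ++ [m] else PySem.List.pyRange i m num) := by
  have hdecomp : m - i = num * ((m - i) / num) + (m - i) % num := by
    have := Int.mul_ediv_add_emod (m - i) num; omega
  set q := (m - i) / num with hqdef
  set r := (m - i) % num with hrdef
  have hr0 : 0 ≤ r := Int.emod_nonneg _ (by omega)
  have hr1 : r < num := Int.emod_lt_of_pos _ hnum
  have hmulsucc : num * (q + 1) = num * q + num := by ring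
  have hmodiff : m % num = i ↔ r = 0 := by
    constructor
    · intro h
      have : r = (m % num - i % num) % num := Int.sub_emod m i num
      rw [this, h, Int.emod_eq_of_lt hi0 hi]
      simp
    · intro h
      have h2 : m % num = i % num := Int.emod_eq_emod_iff_emod_sub_eq_zero.mpr (by rw [← hrdef]; exact h)
      rw [h2, Int.emod_eq_of_lt hi0 hi]
  have hmle : m % num ≤ m := by
    by_cases hc : m < num
    · rw [Int.emod_eq_of_lt hm hc]
    · have := Int.emod_lt_of_pos m hnum
      omega
  by_cases h : m % num = i
  · -- m is hit: the element count grows by one and the new element is m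
    rw [if_pos h]
    have hrz : r = 0 := hmodiff.mp h
    have him : i ≤ m := by omega
    have hq0 : 0 ≤ q := Int.ediv_nonneg (by omega) (by omega)
    rw [PySem.List.pyRange_of_pos _ _ hnum, PySem.List.pyRange_of_pos _ _ hnum]
    rw [if_pos (show i < m + 1 by omega)]
    have hc1 : (m + 1 - i + num - 1) / num = q + 1 :=
      ediv_of_decomp _ _ _ 0 hnum (by omega) (by omega) (by omega)
    by_cases him' : i < m
    · rw [if_pos him']
      have hq1 : 1 ≤ q := by
        rcases eq_or_lt_of_le hq0 with hq | hq
        · exfalso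
          have : num * q = 0 := by rw [← hq]; ring
          omega
        · omega
      have hc0 : (m - i + num - 1) / num = q :=
        ediv_of_decomp _ _ _ (num - 1) hnum (by omega) (by omega) (by omega)
      rw [hc1, hc0]
      have htn : (q + 1).toNat = q.toNat + 1 := by omega
      rw [htn, List.range_succ]
      simp only [List.map_append, List.map_cons, List.map_nil]
      congr 1
      simp only [List.cons.injEq, and_true]
      have hcast : (q.toNat : Int) = q := by omega
      rw [hcast]
      omega
    · -- i = m: the fold was empty, out comes the singleton [m]
      rw [if_neg him']
      have hieq : i = m := by omega
      have hq0' : q = 0 := by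
        have : num * q = 0 := by omega
        rcases mul_eq_zero.mp this with h' | h'
        · omega
        · exact h'
      rw [hc1, hq0']
      simp [hieq]
  · -- m is not hit: the element count is unchanged
    rw [if_neg h]
    have hrz : r ≠ 0 := fun hc => h (hmodiff.mpr hc)
    rw [PySem.List.pyRange_of_pos _ _ hnum, PySem.List.pyRange_of_pos _ _ hnum]
    by_cases hiltm1 : i < m + 1
    · rw [if_pos hiltm1]
      have him : i < m := by
        by_contra hc
        have hieq : i = m := by omega
        have : r = 0 := by rw [hrdef, hieq]; simp
        exact hrz this
      rw [if_pos him]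
      have hc1 : (m + 1 - i + num - 1) / num = q + 1 :=
        ediv_of_decomp _ _ _ r hnum (by omega) (by omega) (by omega)
      have hc0 : (m - i + num - 1) / num = q + 1 :=
        ediv_of_decomp _ _ _ (r - 1) hnum (by omega) (by omega) (by omega)
      rw [hc1, hc0]
    · rw [if_neg hiltm1, if_neg (show ¬ i < m by omega)]

-- loop invariant of A's round-robin scatter: after m steps, fold i holds exactly the
-- stride range [i, i+num, …) below m, and the running index is m % num
lemma loop_inv (num : Int) (hnum : 0 < num) (n : Nat) :
    (PySem.List.pyRange 0 (n : Int) 1).foldl (rfiStep num)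
      ((PySem.List.pyRange 0 num 1).map (fun _ => ([] : List Int)), 0)
    = ((PySem.List.pyRange 0 num 1).map (fun i => PySem.List.pyRange i (n : Int) num),
       PySem.Int.mod (n : Int) num) := by
  induction n with
  | zero =>
      have h0 : PySem.List.pyRange 0 ((0 : Nat) : Int) 1 = [] :=
        PySem.List.pyRange_one_eq_nil (by simp)
      rw [h0]
      simp only [List.foldl_nil]
      rw [Prod.ext_iff]
      constructor
      · exact List.map_congr_left (fun a ha => by
          have := PySem.List.mem_pyRange_one.mp ha
          exact (pyRange_pos_nil a 0 num hnum (by omega)).symm)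
      · rw [PySem.Int.mod_eq_emod_of_pos hnum]
        simp
  | succ k ih =>
      have hcast : ((k + 1 : Nat) : Int) = (k : Int) + 1 := by push_cast; ring
      rw [hcast, PySem.List.pyRange_one_succ_right (by omega), List.foldl_append, ih]
      simp only [List.foldl_cons, List.foldl_nil]
      rw [Prod.ext_iff]
      unfold rfiStep
      dsimp only
      have hmod : PySem.Int.mod (k : Int) num = (k : Int) % num :=
        PySem.Int.mod_eq_emod_of_pos hnum
      have hmod0 : 0 ≤ (k : Int) % num := Int.emod_nonneg _ (by omega)
      have hmodlt : (k : Int) % num < num := Int.emod_lt_of_pos _ hnum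
      constructor
      · -- the modified fold list
        apply List.ext_getElem
        · simp [List.length_modify]
        · intro t h1 h2
          rw [List.getElem_modify]
          have hlen : t < (PySem.List.pyRange 0 num 1).length := by
            simpa [List.length_modify] using h1
          rw [List.getElem_map, List.getElem_map]
          have hel : (PySem.List.pyRange 0 num 1)[t] = (t : Int) := by
            rw [PySem.List.getElem_pyRange_one]; ring
          rw [hel]
          have htnum : (t : Int) < num := by
            have := hlen
            rw [PySem.List.length_pyRange_one] at this
            omega
          rw [stride_succ (t : Int) (k : Int) num hnum (by omega) htnum (by omega)]
          by_cases hc : (k : Int) % num = (t : Int)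
          · rw [if_pos (show (PySem.Int.mod (k : Int) num).toNat = t by rw [hmod]; omega),
                if_pos hc]
          · rw [if_neg (show ¬ (PySem.Int.mod (k : Int) num).toNat = t by rw [hmod]; omega),
                if_neg hc]
      · -- the updated running index: ((k % num) + 1) % num = (k + 1) % num
        have hk : (k : Int) + 1 = (k : Int) % num + 1 + num * ((k : Int) / num) := by
          have := Int.mul_ediv_add_emod (k : Int) num; omega
        rw [hmod]
        conv_rhs => rw [PySem.Int.mod_eq_emod_of_pos hnum, hk]
        rw [PySem.Int.mod_eq_emod_of_pos hnum, Int.add_mul_emod_self_left]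

-- ===== VERDICT (by name: the statement is the Claim_ definition above) =====
theorem return_fold_indices_spec : Claim_equal_return_fold_indices := by
  intro ti_len num _ hpre
  unfold Spec_return_fold_indices return_fold_indices return_fold_indices_alt
  rcases hpre with hnum | ⟨hneg, hlen⟩
  · -- num ≥ 1
    by_cases hlen : ti_len ≤ 0
    · rw [PySem.List.pyRange_one_eq_nil hlen]
      simp only [List.foldl_nil]
      exact List.map_congr_left (fun a ha => by
        have := PySem.List.mem_pyRange_one.mp ha
        exact (pyRange_pos_nil a ti_len num (by omega) (by omega)).symm)
    · have hcast : ti_len = ((ti_len.toNat : Nat) : Int) := by omega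
      rw [hcast]
      have := loop_inv num (by omega) ti_len.toNat
      simp only [this]
  · -- num < 0 and ti_len ≤ 0: both fold lists are empty
    rw [PySem.List.pyRange_one_eq_nil (show num ≤ 0 by omega),
        PySem.List.pyRange_one_eq_nil hlen]
    simp
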